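-- pv_equiv track=rewrite | github.com/NightVovy/OptimizeWithNpaNew | count_gradient/ai_experoments/202512_sdp2/get_func1.py | reduce_projector_indices
-- ===== SOURCE A (Python) =====
-- def reduce_projector_indices(indices):
--     """
--     化简投影算子序列。
--     规则: E^2 = E, 且不同方的算符对易。
--     """
--
--     def get_party(idx):
--         return 0 if idx < 2 else 1
--
--     while True:
--         made_simplification = False
--         length = len(indices)
--
--         if length == 0:
--             break
--
--         i = 0
--         while i < len(indices) - 1:
--             j = i + 1
--             idx_i = indices[i]
--             idx_j = indices[j]
--             party_i = get_party(idx_i)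
--             party_j = get_party(idx_j)
--
--             # 规则: E^2 = E (合并，注意这里只 pop 一个)
--             if idx_i == idx_j:
--                 indices.pop(j)
--                 made_simplification = True
--                 break
--
--             # 规则: 同方阻隔
--             if party_i == party_j:
--                 i += 1
--                 continue
--
--             # 规则: 交换顺序
--             if idx_i > idx_j:
--                 indices[i], indices[j] = indices[j], indices[i]
--                 made_simplification = True
--                 break
--
--             i += 1
--
--         if not made_simplification:
--             break
--
--     return indices
-- ===== SOURCE B (Python) =====
-- def reduce_projector_indices(indices):
--     """One pass: stable partition by party (party 0 = idx < 2 first), then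
--     collapse consecutive equal indices.  Returns a new list (does not mutate)."""
--     p0 = [x for x in indices if x < 2]
--     p1 = [x for x in indices if not x < 2]
--     out = []
--     for x in p0 + p1:
--         if out and out[-1] == x:
--             continue
--         out.append(x)
--     return out
-- ===== Notes on version B (the rewrite author's own statement) =====
-- stated objective: faster
-- what changed: Replaced the restart-after-every-rewrite bubble process (repeated adjacent swap/merge scans) by a single stable partition by party followed by one pass collapsing consecutive duplicates; B returns a fresh list instead of mutating the argument in place.
import Mathlib
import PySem

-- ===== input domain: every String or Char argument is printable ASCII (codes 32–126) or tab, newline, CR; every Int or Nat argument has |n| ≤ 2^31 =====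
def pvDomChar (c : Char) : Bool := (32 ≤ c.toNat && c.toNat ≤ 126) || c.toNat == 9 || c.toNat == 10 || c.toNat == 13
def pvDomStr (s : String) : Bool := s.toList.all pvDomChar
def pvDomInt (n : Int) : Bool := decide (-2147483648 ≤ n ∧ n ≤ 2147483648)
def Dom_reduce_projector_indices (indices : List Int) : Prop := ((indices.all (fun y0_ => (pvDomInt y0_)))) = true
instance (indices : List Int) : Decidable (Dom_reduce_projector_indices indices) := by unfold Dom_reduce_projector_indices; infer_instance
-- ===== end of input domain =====

-- B replaces A's restart-on-every-rewrite bubble process by one stable partition by party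
-- plus one duplicate-collapsing pass (objective: faster, O(n) vs O(n^2)).
-- A mutates its argument in place and returns it; B builds a new list: the equivalence
-- proved here is about the RETURN value only.

-- ===== PORT A =====
-- helper get_party
def pvParty (x : Int) : Int := if x < 2 then 0 else 1

-- one pass of A's inner while loop: first applicable rule from the left, `none` = no rule fired
def pvScan : List Int → Option (List Int)
  | a :: b :: rest =>
    if a = b then some (a :: rest)                                   -- E^2 = E: pop j
    else if pvParty a = pvParty b then (pvScan (b :: rest)).map (a :: ·)  -- same party: i += 1
    else if a > b then some (b :: a :: rest)                          -- commute: swap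
    else (pvScan (b :: rest)).map (a :: ·)                            -- i += 1
  | _ => none

-- termination measure for A's outer `while True` loop (needed by the port's recursion)
def pvP0 (l : List Int) : Nat := (l.filter (fun x => decide (x < 2))).length

def pvInv : List Int → Nat
  | [] => 0
  | a :: r => (if a < 2 then 0 else pvP0 r) + pvInv r

def pvMeas (l : List Int) : Nat := l.length + pvInv l

theorem pvP0_cons (x : Int) (r : List Int) :
    pvP0 (x :: r) = (if x < 2 then 1 else 0) + pvP0 r := by
  simp [pvP0, List.filter_cons]; split_ifs <;> simp [Nat.add_comm]

theorem pvScan_p0 : ∀ (l l' : List Int), pvScan l = some l' → pvP0 l' ≤ pvP0 l := by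
  intro l
  induction l with
  | nil => intro l' h; simp [pvScan] at h
  | cons a t ih =>
    intro l' h
    match t, h with
    | [], h => simp [pvScan] at h
    | b :: rest, h =>
      simp only [pvScan] at h
      split_ifs at h with h1 h2 h3
      · cases h; subst h1
        simp only [pvP0_cons]; split_ifs <;> omega
      · rcases Option.map_eq_some_iff.mp h with ⟨t', ht', rfl⟩
        have hp := ih t' ht'
        simp only [pvP0_cons] at hp ⊢; split_ifs at hp ⊢ <;> omega
      · cases h
        simp only [pvP0_cons]; split_ifs <;> omega
      · rcases Option.map_eq_some_iff.mp h with ⟨t', ht', rfl⟩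
        have hp := ih t' ht'
        simp only [pvP0_cons] at hp ⊢; split_ifs at hp ⊢ <;> omega

theorem pvScan_meas : ∀ (l l' : List Int), pvScan l = some l' → pvMeas l' < pvMeas l := by
  intro l
  induction l with
  | nil => intro l' h; simp [pvScan] at h
  | cons a t ih =>
    intro l' h
    match t, h with
    | [], h => simp [pvScan] at h
    | b :: rest, h =>
      simp only [pvScan] at h
      split_ifs at h with h1 h2 h3
      · -- merge
        cases h; subst h1
        simp only [pvMeas, pvInv, List.length_cons, pvP0_cons]
        split_ifs <;> omega
      · -- same party, recurse
        rcases Option.map_eq_some_iff.mp h with ⟨t', ht', rfl⟩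
        have hm := ih t' ht'
        have hp := pvScan_p0 _ _ ht'
        simp only [pvMeas, pvInv, List.length_cons, pvP0_cons] at hm hp ⊢
        split_ifs at hm hp ⊢ <;> omega
      · -- swap: parties differ and a > b, hence ¬ a < 2 and b < 2
        cases h
        have hb : b < 2 := by
          by_contra hb
          have ha : ¬ a < 2 := by intro ha; omega
          simp [pvParty, ha, hb] at h2
        have ha : ¬ a < 2 := by
          intro ha; simp [pvParty, ha, hb] at h2
        simp only [pvMeas, pvInv, List.length_cons, pvP0_cons, if_pos hb, if_neg ha]
        omega
      · -- recurse
        rcases Option.map_eq_some_iff.mp h with ⟨t', ht', rfl⟩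
        have hm := ih t' ht'
        have hp := pvScan_p0 _ _ ht'
        simp only [pvMeas, pvInv, List.length_cons, pvP0_cons] at hm hp ⊢
        split_ifs at hm hp ⊢ <;> omega

-- A's outer `while True` loop
def pvReduceLoop (l : List Int) : List Int :=
  match h : pvScan l with
  | some l' => pvReduceLoop l'
  | none => l
termination_by pvMeas l
decreasing_by exact pvScan_meas _ _ h

def reduce_projector_indices (indices : List Int) : List Int := pvReduceLoop indices

-- ===== PORT B =====
def reduce_projector_indices_alt (indices : List Int) : List Int :=
  let p0 := indices.filter (fun x => decide (x < 2))
  let p1 := indices.filter (fun x => decide (¬ x < 2))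
  (p0 ++ p1).foldl (fun out x => if out.getLast? = some x then out else out ++ [x]) []

-- ===== PRECONDITION & SPEC =====
def Spec_reduce_projector_indices (indices : List Int) (out : List Int) : Prop := out = reduce_projector_indices_alt indices
instance (indices : List Int) (out : List Int) : Decidable (Spec_reduce_projector_indices indices out) := by unfold Spec_reduce_projector_indices; infer_instance

-- ===== CLAIM (what is proved, stated in full; the proofs are below) =====
def Claim_equal_reduce_projector_indices : Prop := ∀ (indices : List Int), Dom_reduce_projector_indices indices → Spec_reduce_projector_indices indices (reduce_projector_indices indices)

-- ===== LEMMAS AND PROOFS =====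

-- collapse of consecutive duplicates, recursion-friendly form
def pvDedupF (p : Int) : List Int → List Int
  | [] => []
  | x :: r => if x = p then pvDedupF p r else x :: pvDedupF x r

def pvDedup : List Int → List Int
  | [] => []
  | x :: r => x :: pvDedupF x r

theorem pvDedup_head? (l : List Int) : (pvDedup l).head? = l.head? := by
  cases l <;> simp [pvDedup]

theorem pvDedup_cons (a : Int) (X : List Int) :
    pvDedup (a :: X) = if X.head? = some a then pvDedup X else a :: pvDedup X := by
  cases X with
  | nil => simp [pvDedup, pvDedupF]
  | cons b r =>
    by_cases hb : b = a <;> simp [pvDedup, pvDedupF, hb]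

theorem pvFold_snoc (l : List Int) : ∀ (pre : List Int) (p : Int),
    l.foldl (fun out x => if out.getLast? = some x then out else out ++ [x]) (pre ++ [p])
      = pre ++ p :: pvDedupF p l := by
  induction l with
  | nil => intro pre p; simp [pvDedupF]
  | cons x r ih =>
    intro pre p
    simp only [List.foldl, List.getLast?_concat]
    by_cases hx : x = p
    · simp [hx, ih pre p, pvDedupF]
    · have h1 : (if some p = some x then pre ++ [p] else pre ++ [p] ++ [x]) = (pre ++ [p]) ++ [x] := by
        simp; intro h; exact absurd h.symm hx
      rw [h1, ih (pre ++ [p]) x]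
      simp [pvDedupF, hx]

theorem pvFold_eq_dedup (l : List Int) :
    l.foldl (fun out x => if out.getLast? = some x then out else out ++ [x]) []
      = pvDedup l := by
  cases l with
  | nil => rfl
  | cons x r =>
    have := pvFold_snoc r [] x
    simpa [pvDedup, List.foldl] using this

theorem pvDedupF_append (v : List Int) (hv : ∀ x ∈ v, ¬ x < 2) :
    ∀ (u : List Int) (p : Int), p < 2 → (∀ x ∈ u, x < 2) →
    pvDedupF p (u ++ v) = pvDedupF p u ++ pvDedup v := by
  intro u
  induction u with
  | nil =>
    intro p hp _
    cases v with
    | nil => simp [pvDedupF, pvDedup]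
    | cons b r =>
      have hb : ¬ b < 2 := hv b (by simp)
      have : b ≠ p := by omega
      simp [pvDedupF, pvDedup, this]
  | cons x u' ih =>
    intro p hp hu
    by_cases hx : x = p
    · simp [pvDedupF, hx, ih p hp (fun y hy => hu y (by simp [hy]))]
    · simp [pvDedupF, hx,
        ih x (hu x (by simp)) (fun y hy => hu y (by simp [hy]))]

theorem pvDedup_append (u v : List Int) (hu : ∀ x ∈ u, x < 2) (hv : ∀ x ∈ v, ¬ x < 2) :
    pvDedup (u ++ v) = pvDedup u ++ pvDedup v := by
  cases u with
  | nil => simp [pvDedup]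
  | cons a u' =>
    have ha : a < 2 := hu a (by simp)
    simp only [List.cons_append, pvDedup]
    rw [pvDedupF_append v hv u' a ha (fun y hy => hu y (by simp [hy]))]
    rfl

-- B in normal form: dedup of each party filter
theorem pvAlt_eq (l : List Int) :
    reduce_projector_indices_alt l
      = pvDedup (l.filter (fun x => decide (x < 2))) ++ pvDedup (l.filter (fun x => decide (¬ x < 2))) := by
  unfold reduce_projector_indices_alt
  rw [pvFold_eq_dedup, pvDedup_append]
  · intro x hx; simpa using (List.of_mem_filter hx)
  · intro x hx; simpa using (List.of_mem_filter hx)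

-- a rewrite step of A preserves the dedup'd party filters
theorem pvScan_filter (P : Int → Bool)
    (hP : ∀ a b, P a = true → P b = true → ((a < 2) ↔ (b < 2))) :
    ∀ (l l' : List Int), pvScan l = some l' →
      pvDedup (l'.filter P) = pvDedup (l.filter P) := by
  intro l
  induction l with
  | nil => intro l' h; simp [pvScan] at h
  | cons a t ih =>
    intro l' h
    match t, h with
    | [], h => simp [pvScan] at h
    | b :: rest, h =>
      simp only [pvScan] at h
      split_ifs at h with h1 h2 h3
      · -- merge a = b
        cases h; subst h1
        by_cases hp : P a = true
        · simp [hp, pvDedup, pvDedupF]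
        · simp [hp]
      · -- same party, step deeper
        rcases Option.map_eq_some_iff.mp h with ⟨t', ht', rfl⟩
        have hEq := ih t' ht'
        have hh : (List.filter P t').head? = (List.filter P (b :: rest)).head? := by
          rw [← pvDedup_head?, ← pvDedup_head? (List.filter P (b :: rest)), hEq]
        by_cases hp : P a = true
        · simp only [List.filter_cons] at hEq hh ⊢
          simp only [hp, if_true]
          rw [pvDedup_cons, pvDedup_cons, hh, hEq]
        · simp only [List.filter_cons] at hEq ⊢
          simp only [hp]
          exact hEq
      · -- swap: parties differ, so P keeps at most one of a, b
        cases h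
        have hab : ¬ (P a = true ∧ P b = true) := by
          rintro ⟨ha, hb⟩
          have := hP a b ha hb
          simp [pvParty] at h2
          split_ifs at h2 <;> simp_all
        by_cases ha : P a = true <;> by_cases hb : P b = true <;>
          simp [ha, hb] at hab ⊢
      · -- different party, a < b, step deeper
        rcases Option.map_eq_some_iff.mp h with ⟨t', ht', rfl⟩
        have hEq := ih t' ht'
        have hh : (List.filter P t').head? = (List.filter P (b :: rest)).head? := by
          rw [← pvDedup_head?, ← pvDedup_head? (List.filter P (b :: rest)), hEq]
        by_cases hp : P a = true
        · simp only [List.filter_cons] at hEq hh ⊢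
          simp only [hp, if_true]
          rw [pvDedup_cons, pvDedup_cons, hh, hEq]
        · simp only [List.filter_cons] at hEq ⊢
          simp only [hp]
          exact hEq

-- when no rule fires the list is already in B's normal form
theorem pvF0_pos (a : Int) (l : List Int) (h : a < 2) :
    List.filter (fun x => decide (x < 2)) (a :: l) = a :: List.filter (fun x => decide (x < 2)) l := by
  simp [show a ≤ 1 by omega]

theorem pvF0_neg (a : Int) (l : List Int) (h : ¬ a < 2) :
    List.filter (fun x => decide (x < 2)) (a :: l) = List.filter (fun x => decide (x < 2)) l := by
  simp [show ¬ a ≤ 1 by omega]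

theorem pvF1_pos (a : Int) (l : List Int) (h : ¬ a < 2) :
    List.filter (fun x => decide (¬ x < 2)) (a :: l) = a :: List.filter (fun x => decide (¬ x < 2)) l := by
  simp [show 1 < a by omega]

theorem pvF1_neg (a : Int) (l : List Int) (h : a < 2) :
    List.filter (fun x => decide (¬ x < 2)) (a :: l) = List.filter (fun x => decide (¬ x < 2)) l := by
  simp [show ¬ 1 < a by omega]

theorem pvScan_none (l : List Int) (h : pvScan l = none) :
    pvDedup (l.filter (fun x => decide (x < 2))) ++ pvDedup (l.filter (fun x => decide (¬ x < 2))) = l := by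
  induction l with
  | nil => simp [pvDedup]
  | cons a t ih =>
    match t with
    | [] =>
      by_cases ha : a < 2
      · rw [pvF0_pos _ _ ha, pvF1_neg _ _ ha]; simp [pvDedup, pvDedupF]
      · rw [pvF0_neg _ _ ha, pvF1_pos _ _ ha]; simp [pvDedup, pvDedupF]
    | b :: rest =>
      simp only [pvScan] at h
      have hab : a ≠ b := by
        intro hc; rw [if_pos hc] at h; simp at h
      rw [if_neg hab] at h
      have hne : ¬ ((b :: rest).head? = some a) := by
        simp; exact fun hc => hab hc.symm
      split_ifs at h with h2 h3
      · -- same party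
        have ht : pvScan (b :: rest) = none := by
          cases hs : pvScan (b :: rest) <;> simp [hs] at h ⊢
        have iht := ih ht
        by_cases ha : a < 2
        · have hb : b < 2 := by
            by_contra hb; simp [pvParty, ha, hb] at h2
          have hh : ((b :: rest).filter (fun x => decide (x < 2))).head? = some b := by
            rw [pvF0_pos _ _ hb]; rfl
          have hne' : ¬ (((b :: rest).filter (fun x => decide (x < 2))).head? = some a) := by
            rw [hh]; simp; exact fun hc => hab hc.symm
          rw [pvF0_pos _ _ ha, pvF1_neg _ _ ha, pvDedup_cons, if_neg hne',
            List.cons_append, iht]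
        · have hb : ¬ b < 2 := by
            intro hb; simp [pvParty, ha, hb] at h2
          -- party-1 head: the party-0 filter of the tail must be empty
          have hf0 : (b :: rest).filter (fun x => decide (x < 2)) = [] := by
            cases hf : (b :: rest).filter (fun x => decide (x < 2)) with
            | nil => rfl
            | cons c cs =>
              exfalso
              have hc2 : c < 2 := by
                have hm : c ∈ (b :: rest).filter (fun x => decide (x < 2)) := by
                  rw [hf]; exact List.mem_cons_self
                simpa using List.of_mem_filter hm
              have hhead : ((pvDedup ((b :: rest).filter fun x => decide (x < 2)) ++
                  pvDedup ((b :: rest).filter fun x => decide (¬ x < 2))).head?) = some b := by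
                rw [iht]; rfl
              rw [hf] at hhead
              simp [pvDedup] at hhead
              omega
          have hf1 : (b :: rest).filter (fun x => decide (¬ x < 2)) = b :: rest := by
            rw [List.filter_eq_self]
            intro x hx
            by_contra hx2
            have hm : x ∈ (b :: rest).filter (fun x => decide (x < 2)) := by
              apply List.mem_filter.mpr; constructor; exact hx; simpa using hx2
            rw [hf0] at hm; simp at hm
          have hd : pvDedup (b :: rest) = b :: rest := by
            have h' := iht; rw [hf0, hf1] at h'; simpa [pvDedup] using h'
          rw [pvF0_neg _ _ ha, pvF1_pos _ _ ha, hf0, hf1, pvDedup_cons,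
            show (b :: rest).head? = some b from rfl, if_neg (by simp; exact fun hc => hab hc.symm), hd]
          simp [pvDedup]
      · -- parties differ, a < b (the swap case `some _ = none` is closed by split_ifs)
        have hab2 : a < b := by omega
        have ha : a < 2 := by
          by_contra ha
          have hb : ¬ b < 2 := by omega
          simp [pvParty, ha, hb] at h2
        have hb : ¬ b < 2 := by
          intro hb; simp [pvParty, ha, hb] at h2
        have ht : pvScan (b :: rest) = none := by
          cases hs : pvScan (b :: rest) <;> simp [hs] at h ⊢
        have iht := ih ht
        have hf0 : (b :: rest).filter (fun x => decide (x < 2)) = [] := by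
          cases hf : (b :: rest).filter (fun x => decide (x < 2)) with
          | nil => rfl
          | cons c cs =>
            exfalso
            have hc2 : c < 2 := by
              have hm : c ∈ (b :: rest).filter (fun x => decide (x < 2)) := by
                rw [hf]; exact List.mem_cons_self
              simpa using List.of_mem_filter hm
            have hhead : ((pvDedup ((b :: rest).filter fun x => decide (x < 2)) ++
                pvDedup ((b :: rest).filter fun x => decide (¬ x < 2))).head?) = some b := by
              rw [iht]; rfl
            rw [hf] at hhead
            simp [pvDedup] at hhead
            omega
        have hf1 : (b :: rest).filter (fun x => decide (¬ x < 2)) = b :: rest := by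
          rw [List.filter_eq_self]
          intro x hx
          by_contra hx2
          have hm : x ∈ (b :: rest).filter (fun x => decide (x < 2)) := by
            apply List.mem_filter.mpr; constructor; exact hx; simpa using hx2
          rw [hf0] at hm; simp at hm
        have hd : pvDedup (b :: rest) = b :: rest := by
          have h' := iht; rw [hf0, hf1] at h'; simpa [pvDedup] using h'
        rw [pvF0_pos _ _ ha, pvF1_neg _ _ ha, hf0, hf1, hd]
        simp [pvDedup, pvDedupF]

theorem pvLoop_eq (l : List Int) :
    pvReduceLoop l
      = pvDedup (l.filter (fun x => decide (x < 2))) ++ pvDedup (l.filter (fun x => decide (¬ x < 2))) := by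
  induction l using pvReduceLoop.induct with
  | case1 l l' hsc ih =>
    have hstep : pvReduceLoop l = pvReduceLoop l' := by
      conv_lhs => unfold pvReduceLoop
      split
      · rename_i l'' h''
        rw [h''] at hsc
        cases hsc
        rfl
      · rename_i h''
        rw [h''] at hsc
        cases hsc
    rw [hstep, ih,
      pvScan_filter (fun x => decide (x < 2)) (by intro a b ha hb; simp_all) l l' hsc,
      pvScan_filter (fun x => decide (¬ x < 2)) (by intro a b ha hb; simp_all; omega) l l' hsc]
  | case2 l hsc =>
    have hstep : pvReduceLoop l = l := by
      conv_lhs => unfold pvReduceLoop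
      split
      · rename_i l'' h''
        rw [h''] at hsc
        cases hsc
      · rfl
    rw [hstep]
    exact (pvScan_none l hsc).symm

-- ===== VERDICT (by name: the statement is the Claim_ definition above) =====
theorem reduce_projector_indices_spec : Claim_equal_reduce_projector_indices := by
  intro l _
  unfold Spec_reduce_projector_indices reduce_projector_indices
  rw [pvLoop_eq, pvAlt_eq]
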